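-- pv_equiv track=rewrite | github.com/LicVit/swf2swiffy | converter/Converter.py | swiffy_integer
-- ===== SOURCE A (Python) =====
-- def swiffy_integer(integer):
--     if integer is None or integer == 0:
--         return ':'
--     elif 0 < integer <= 26:
--         return chr(integer + 96)
--     elif 0 > integer >= -26:
--         return chr(-integer + 64)
--     elif integer > 26:
--         remain = integer // 10
--         end = str(integer % 10)
--         while remain > 26:
--             end = str(remain % 10) + end
--             remain //= 10
--         return str(end) + swiffy_integer(remain)
--     else:
--         end = str((-integer) % 10)
--         remain = -((-integer) // 10)
--         while remain < -26:
--             end = str((-remain) % 10) + end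
--             remain = -((-remain) // 10)
--         return str(end) + swiffy_integer(remain)
-- ===== SOURCE B (Python) =====
-- def swiffy_integer(integer):
--     if integer is None or integer == 0:
--         return ':'
--     s = str(abs(integer))
--     p = 2 if int(s[:2]) <= 26 else 1
--     lead = int(s[:p])
--     rest = s[p:]
--     offset = 96 if integer > 0 else 64
--     return rest + chr(lead + offset)
-- ===== Notes on version B (the rewrite author's own statement) =====
-- stated objective: simpler
-- what changed: Replaces A's recursive tail call plus two mod/div digit-peeling while-loops with a direct computation on the decimal string: take abs(n) as a string, split off the longest 1-or-2-digit prefix that is <= 26, and append that prefix's letter (offset 96 or 64 by sign) after the remaining digits.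
import Mathlib
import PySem

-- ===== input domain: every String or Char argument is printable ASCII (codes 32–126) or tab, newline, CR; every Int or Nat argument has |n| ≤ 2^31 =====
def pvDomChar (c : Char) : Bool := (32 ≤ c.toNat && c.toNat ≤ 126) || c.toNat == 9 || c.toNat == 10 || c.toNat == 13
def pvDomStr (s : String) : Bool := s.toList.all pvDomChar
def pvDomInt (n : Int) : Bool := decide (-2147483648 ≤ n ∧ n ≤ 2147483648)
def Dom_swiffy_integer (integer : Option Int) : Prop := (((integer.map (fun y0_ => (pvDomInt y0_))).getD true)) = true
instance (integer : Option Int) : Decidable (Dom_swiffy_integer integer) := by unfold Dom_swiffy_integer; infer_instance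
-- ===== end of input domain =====

-- B replaces A's recursive tail call + mod/div digit-peeling loops by splitting the decimal
-- string of abs(n) at its longest 1-or-2-digit prefix ≤ 26 (objective: simpler; same cost).


-- ===== PORT A =====
-- `while remain > 26: end = str(remain % 10) + end; remain //= 10` (strings as List Char;
-- fuel is a totality guard only: `remain.natAbs` bounds the number of iterations)
def peelPos (fuel : Nat) (remain : Int) (e : List Char) : Int × List Char :=
  match fuel with
  | 0 => (remain, e)
  | f + 1 =>
    if 26 < remain then
      peelPos f (PySem.Int.floordiv remain 10) (PySem.Int.toChars (PySem.Int.mod remain 10) ++ e)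
    else (remain, e)

-- `while remain < -26: end = str((-remain) % 10) + end; remain = -((-remain) // 10)`
def peelNeg (fuel : Nat) (remain : Int) (e : List Char) : Int × List Char :=
  match fuel with
  | 0 => (remain, e)
  | f + 1 =>
    if remain < -26 then
      peelNeg f (-(PySem.Int.floordiv (-remain) 10)) (PySem.Int.toChars (PySem.Int.mod (-remain) 10) ++ e)
    else (remain, e)

-- chr(k) for 0 ≤ k < 0x110000 (exact here: all codes produced are ASCII letters/':')
def pyChr (k : Int) : List Char := [Char.ofNat k.toNat]

-- A's recursion, with a fuel guard for totality (`n.natAbs + 2` is always enough: the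
-- tail call's argument is the peeled remainder, which lands in a non-recursive branch)
def swiffyCoreA (fuel : Nat) (n : Int) : List Char :=
  match fuel with
  | 0 => []
  | f + 1 =>
    if n = 0 then [':']
    else if 0 < n ∧ n ≤ 26 then pyChr (n + 96)
    else if 0 > n ∧ n ≥ -26 then pyChr (-n + 64)
    else if 26 < n then
      let pr := peelPos (PySem.Int.floordiv n 10).natAbs (PySem.Int.floordiv n 10)
        (PySem.Int.toChars (PySem.Int.mod n 10))
      pr.2 ++ swiffyCoreA f pr.1
    else
      let pr := peelNeg (PySem.Int.floordiv (-n) 10).natAbs (-(PySem.Int.floordiv (-n) 10))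
        (PySem.Int.toChars (PySem.Int.mod (-n) 10))
      pr.2 ++ swiffyCoreA f pr.1

def swiffy_integer (integer : Option Int) : String :=
  match integer with
  | none => ":"
  | some n => String.ofList (swiffyCoreA (n.natAbs + 2) n)

-- ===== PORT B =====
def swiffy_integer_alt (integer : Option Int) : String :=
  match integer with
  | none => ":"
  | some n =>
    if n = 0 then ":"
    else
      let s := PySem.Int.toChars (|n|)                 -- str(abs(integer))
      -- int(s[:2]) / int(s[:p]) never raise on a digit string: .getD 0 is unreachable
      let p : Int := if (PySem.Int.ofChars? (PySem.List.slice s none (some 2))).getD 0 ≤ 26 then 2 else 1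
      let lead := (PySem.Int.ofChars? (PySem.List.slice s none (some p))).getD 0
      let rest := PySem.List.slice s (some p) none
      let offset : Int := if 0 < n then 96 else 64
      String.ofList (rest ++ [Char.ofNat (lead + offset).toNat])   -- rest + chr(lead + offset)

-- ===== PRECONDITION & SPEC =====
def Spec_swiffy_integer (integer : Option Int) (out : String) : Prop := out = swiffy_integer_alt integer
instance (integer : Option Int) (out : String) : Decidable (Spec_swiffy_integer integer out) := by unfold Spec_swiffy_integer; infer_instance

-- ===== CLAIM (what is proved, stated in full; the proofs are below) =====
def Claim_equal_swiffy_integer : Prop := ∀ (integer : Option Int), Dom_swiffy_integer integer → Spec_swiffy_integer integer (swiffy_integer integer)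

-- ===== LEMMAS AND PROOFS =====

-- proof-side characterisation of the peel loops: split m's digit string after its
-- leading 1-or-2-digit value ≤ 26
def gD (m : Nat) : Nat × List Char :=
  if m ≤ 26 then (m, []) else
    ((gD (m / 10)).1, (gD (m / 10)).2 ++ [Nat.digitChar (m % 10)])
termination_by m
decreasing_by omega

theorem toDigitsCore_append (f n : Nat) (ds : List Char) :
    Nat.toDigitsCore 10 f n ds = Nat.toDigitsCore 10 f n [] ++ ds := by
  induction f generalizing n ds with
  | zero => simp [Nat.toDigitsCore]
  | succ f ih =>
    simp only [Nat.toDigitsCore]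
    split
    · rfl
    · rw [ih (n / 10) ((n % 10).digitChar :: ds), ih (n / 10) [(n % 10).digitChar]]
      simp

theorem toDigitsCore_fuel (f₁ f₂ n : Nat) (h₁ : n < f₁) (h₂ : n < f₂) :
    Nat.toDigitsCore 10 f₁ n [] = Nat.toDigitsCore 10 f₂ n [] := by
  induction n using Nat.strong_induction_on generalizing f₁ f₂ with
  | _ n ih =>
    match f₁, f₂ with
    | f₁ + 1, f₂ + 1 =>
      simp only [Nat.toDigitsCore]
      split
      · rfl
      · rw [toDigitsCore_append f₁, toDigitsCore_append f₂,
          ih (n / 10) (by omega) f₁ f₂ (by omega) (by omega)]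

theorem toDigits_step (m : Nat) (h : 10 ≤ m) :
    Nat.toDigits 10 m = Nat.toDigits 10 (m / 10) ++ [Nat.digitChar (m % 10)] := by
  show Nat.toDigitsCore 10 (m + 1) m [] = _
  rw [Nat.toDigitsCore]
  rw [if_neg (by omega)]
  rw [toDigitsCore_append m (m / 10)]
  rw [toDigitsCore_fuel m (m / 10 + 1) (m / 10) (by omega) (by omega)]
  rfl

theorem toDigits_single : ∀ d, d < 10 → Nat.toDigits 10 d = [Nat.digitChar d] := by decide

theorem parse_small : ∀ r, r < 27 → 1 ≤ r →
    PySem.Int.ofChars? (Nat.toDigits 10 r) = some (r : Int) := by decide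

theorem len_small : ∀ r, r < 27 → 1 ≤ r →
    (Nat.toDigits 10 r).length = (if r < 10 then 1 else 2) := by decide

theorem parse_two : ∀ a, a < 10 → ∀ b, b < 10 → 1 ≤ a →
    PySem.Int.ofChars? [Nat.digitChar a, Nat.digitChar b] = some ((10 * a + b : Nat) : Int) := by decide

theorem parse_one : ∀ a, a < 10 → 1 ≤ a →
    PySem.Int.ofChars? [Nat.digitChar a] = some ((a : Nat) : Int) := by decide

theorem gD_spec (m : Nat) (h : 1 ≤ m) :
    1 ≤ (gD m).1 ∧ (gD m).1 ≤ 26 ∧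
    Nat.toDigits 10 m = Nat.toDigits 10 (gD m).1 ++ (gD m).2 ∧
    ((m ≤ 26 ∧ (gD m).1 = m ∧ (gD m).2 = []) ∨
     (26 < m ∧ ∃ d ts, (gD m).2 = Nat.digitChar d :: ts ∧ d < 10 ∧ 26 < 10 * (gD m).1 + d)) := by
  induction m using Nat.strong_induction_on with
  | _ m ih =>
    by_cases hm : m ≤ 26
    · rw [gD, if_pos hm]
      exact ⟨h, hm, by simp, Or.inl ⟨hm, rfl, rfl⟩⟩
    · have h10 : 1 ≤ m / 10 := by omega
      obtain ⟨ih1, ih2, ih3, ih4⟩ := ih (m / 10) (by omega) h10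
      rw [gD, if_neg hm]
      refine ⟨ih1, ih2, ?_, ?_⟩
      · rw [toDigits_step m (by omega), ih3, List.append_assoc]
      · right
        refine ⟨by omega, ?_⟩
        rcases ih4 with ⟨hle, he1, he2⟩ | ⟨-, d, ts, hd1, hd2, hd3⟩
        · exact ⟨m % 10, [], by rw [he2]; rfl, by omega, by omega⟩
        · exact ⟨d, ts ++ [Nat.digitChar (m % 10)], by rw [hd1]; rfl, hd2, hd3⟩

theorem peelPos_eq (fuel m : Nat) (e : List Char) (hf : m ≤ fuel) :
    peelPos fuel (m : Int) e = (((gD m).1 : Int), (gD m).2 ++ e) := by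
  induction fuel generalizing m e with
  | zero =>
    have hm0 : m = 0 := by omega
    subst hm0
    simp only [peelPos]
    rw [gD, if_pos (by omega)]
    simp
  | succ f ih =>
    simp only [peelPos]
    by_cases hm : m ≤ 26
    · rw [if_neg (by exact_mod_cast (by omega : ¬ (26:Int) < m)), gD, if_pos hm]
      simp
    · rw [if_pos (by exact_mod_cast (by omega : (26:Int) < m))]
      rw [(by norm_num : (10:Int) = ((10:Nat):Int)), PySem.Int.floordiv_natCast, PySem.Int.mod_natCast]
      rw [ih (m / 10) _ (by omega)]
      have hg : gD m = ((gD (m / 10)).1, (gD (m / 10)).2 ++ [Nat.digitChar (m % 10)]) := by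
        rw [gD, if_neg hm]
      have hsingle : PySem.Int.toChars ((m % 10 : Nat) : Int) = Nat.toDigits 10 (m % 10) := by
        rw [PySem.Int.toChars, if_neg (by omega)]
        simp only [Int.toNat_natCast]
      rw [hg, hsingle, toDigits_single (m % 10) (by omega)]
      simp

theorem peelNeg_eq (fuel m : Nat) (e : List Char) (hf : m ≤ fuel) :
    peelNeg fuel (-(m : Int)) e = (-((gD m).1 : Int), (gD m).2 ++ e) := by
  induction fuel generalizing m e with
  | zero =>
    have hm0 : m = 0 := by omega
    subst hm0
    simp only [peelNeg]
    rw [gD, if_pos (by omega)]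
    simp
  | succ f ih =>
    simp only [peelNeg]
    by_cases hm : m ≤ 26
    · rw [if_neg (by exact_mod_cast (by omega : ¬ -(m:Int) < -26)), gD, if_pos hm]
      simp
    · rw [if_pos (by exact_mod_cast (by omega : -(m:Int) < -26))]
      rw [neg_neg, (by norm_num : (10:Int) = ((10:Nat):Int)), PySem.Int.floordiv_natCast, PySem.Int.mod_natCast]
      rw [ih (m / 10) _ (by omega)]
      have hg : gD m = ((gD (m / 10)).1, (gD (m / 10)).2 ++ [Nat.digitChar (m % 10)]) := by
        rw [gD, if_neg hm]
      have hsingle : PySem.Int.toChars ((m % 10 : Nat) : Int) = Nat.toDigits 10 (m % 10) := by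
        rw [PySem.Int.toChars, if_neg (by omega)]
        simp only [Int.toNat_natCast]
      rw [hg, hsingle, toDigits_single (m % 10) (by omega)]
      simp

theorem a_side_pos (fuel : Nat) (n : Int) (h : 0 < n) (hfuel : 2 ≤ fuel) :
    swiffyCoreA fuel n = (gD n.natAbs).2 ++ [Char.ofNat ((((gD n.natAbs).1 : Int)) + 96).toNat] := by
  obtain ⟨f, rfl⟩ : ∃ f, fuel = f + 1 := ⟨fuel - 1, by omega⟩
  simp only [swiffyCoreA]
  by_cases h26 : n ≤ 26
  · rw [if_neg (by omega), if_pos ⟨h, h26⟩, gD, if_pos (by omega),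
      (by omega : ((n.natAbs : Nat) : Int) = n)]
    rfl
  · rw [if_neg (by omega), if_neg (by omega), if_neg (by omega), if_pos (by omega : (26:Int) < n)]
    have hfd : PySem.Int.floordiv n 10 = ((n.natAbs / 10 : Nat) : Int) := by
      rw [PySem.Int.floordiv_eq_ediv_of_pos (by norm_num)]
      omega
    have hmd : PySem.Int.mod n 10 = ((n.natAbs % 10 : Nat) : Int) := by
      rw [PySem.Int.mod_eq_emod_of_pos (by norm_num)]
      omega
    have hsingle : PySem.Int.toChars ((n.natAbs % 10 : Nat) : Int) = Nat.toDigits 10 (n.natAbs % 10) := by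
      rw [PySem.Int.toChars, if_neg (by omega)]
      simp only [Int.toNat_natCast]
    rw [hfd, hmd, hsingle, toDigits_single (n.natAbs % 10) (by omega), Int.natAbs_natCast,
      peelPos_eq (n.natAbs / 10) (n.natAbs / 10) _ (le_refl _)]
    have hg : gD n.natAbs = ((gD (n.natAbs / 10)).1, (gD (n.natAbs / 10)).2 ++ [Nat.digitChar (n.natAbs % 10)]) := by
      rw [gD, if_neg (by omega)]
    have hb := gD_spec (n.natAbs / 10) (by omega)
    rw [hg]
    simp only []
    obtain ⟨f', rfl⟩ : ∃ f', f = f' + 1 := ⟨f - 1, by omega⟩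
    simp only [swiffyCoreA]
    rw [if_neg (by exact_mod_cast (by omega : ((gD (n.natAbs / 10)).1 : Int) ≠ 0)),
      if_pos ⟨by exact_mod_cast hb.1, by exact_mod_cast hb.2.1⟩]
    simp [pyChr]

theorem a_side_neg (fuel : Nat) (n : Int) (h : n < 0) (hfuel : 2 ≤ fuel) :
    swiffyCoreA fuel n = (gD n.natAbs).2 ++ [Char.ofNat ((((gD n.natAbs).1 : Int)) + 64).toNat] := by
  obtain ⟨f, rfl⟩ : ∃ f, fuel = f + 1 := ⟨fuel - 1, by omega⟩
  simp only [swiffyCoreA]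
  by_cases h26 : -26 ≤ n
  · rw [if_neg (by omega), if_neg (by omega), if_pos ⟨h, h26⟩, gD, if_pos (by omega),
      (by omega : ((n.natAbs : Nat) : Int) = -n)]
    rfl
  · rw [if_neg (by omega), if_neg (by omega), if_neg (by omega), if_neg (by omega : ¬ (26:Int) < n)]
    have hfd : PySem.Int.floordiv (-n) 10 = ((n.natAbs / 10 : Nat) : Int) := by
      rw [PySem.Int.floordiv_eq_ediv_of_pos (by norm_num)]
      omega
    have hmd : PySem.Int.mod (-n) 10 = ((n.natAbs % 10 : Nat) : Int) := by
      rw [PySem.Int.mod_eq_emod_of_pos (by norm_num)]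
      omega
    have hsingle : PySem.Int.toChars ((n.natAbs % 10 : Nat) : Int) = Nat.toDigits 10 (n.natAbs % 10) := by
      rw [PySem.Int.toChars, if_neg (by omega)]
      simp only [Int.toNat_natCast]
    rw [hfd, hmd, hsingle, toDigits_single (n.natAbs % 10) (by omega), Int.natAbs_natCast,
      peelNeg_eq (n.natAbs / 10) (n.natAbs / 10) _ (le_refl _)]
    have hg : gD n.natAbs = ((gD (n.natAbs / 10)).1, (gD (n.natAbs / 10)).2 ++ [Nat.digitChar (n.natAbs % 10)]) := by
      rw [gD, if_neg (by omega)]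
    have hb := gD_spec (n.natAbs / 10) (by omega)
    rw [hg]
    simp only []
    obtain ⟨f', rfl⟩ : ∃ f', f = f' + 1 := ⟨f - 1, by omega⟩
    simp only [swiffyCoreA]
    rw [if_neg (by exact_mod_cast (by omega : -((gD (n.natAbs / 10)).1 : Int) ≠ 0)),
      if_neg (by exact_mod_cast (by omega : ¬ (0 < -((gD (n.natAbs / 10)).1 : Int) ∧ -((gD (n.natAbs / 10)).1 : Int) ≤ 26))),
      if_pos ⟨by exact_mod_cast (by omega : -((gD (n.natAbs / 10)).1 : Int) < 0), by exact_mod_cast (by omega : (-26:Int) ≤ -((gD (n.natAbs / 10)).1 : Int))⟩,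
      neg_neg]
    simp [pyChr]

theorem b_side (m : Nat) (hm : 1 ≤ m) (off : Int) :
    (PySem.List.slice (Nat.toDigits 10 m) (some (if (PySem.Int.ofChars? (PySem.List.slice (Nat.toDigits 10 m) none (some 2))).getD 0 ≤ 26 then (2:Int) else 1)) none) ++
      [Char.ofNat ((PySem.Int.ofChars? (PySem.List.slice (Nat.toDigits 10 m) none (some (if (PySem.Int.ofChars? (PySem.List.slice (Nat.toDigits 10 m) none (some 2))).getD 0 ≤ 26 then (2:Int) else 1)))).getD 0 + off).toNat]
    = (gD m).2 ++ [Char.ofNat ((((gD m).1 : Int)) + off).toNat] := by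
  obtain ⟨g1, g2, g3, g4⟩ := gD_spec m hm
  rcases g4 with ⟨hle, hr, ht⟩ | ⟨hgt, d, ts, ht, hd, hbig⟩
  · -- m ≤ 26 : the whole string is the prefix, rest is empty
    have hlen : (Nat.toDigits 10 m).length ≤ 2 := by
      have := len_small m (by omega) hm
      split at this <;> omega
    have htake : PySem.List.slice (Nat.toDigits 10 m) none (some 2) = Nat.toDigits 10 m := by
      rw [PySem.List.slice_to _ (by norm_num : (0:Int) ≤ 2)]
      exact List.take_of_length_le (by simpa using hlen)
    rw [htake, parse_small m (by omega) hm]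
    rw [if_pos (by simp; exact_mod_cast hle)]
    rw [htake, parse_small m (by omega) hm]
    rw [PySem.List.slice_from _ (by norm_num : (0:Int) ≤ 2)]
    rw [List.drop_eq_nil_of_le (by simpa using hlen)]
    rw [ht, hr]
    rfl
  · -- 26 < m : prefix is (gD m).1, rest is (gD m).2
    by_cases hr10 : (gD m).1 < 10
    · -- one-digit prefix: the two-char head 10*r+d exceeds 26, so p = 1
      have hsingle := toDigits_single (gD m).1 hr10
      have hs : Nat.toDigits 10 m = Nat.digitChar (gD m).1 :: Nat.digitChar d :: ts := by
        rw [g3, hsingle, ht]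
        rfl
      have htake2 : PySem.List.slice (Nat.toDigits 10 m) none (some 2) = [Nat.digitChar (gD m).1, Nat.digitChar d] := by
        rw [PySem.List.slice_to _ (by norm_num : (0:Int) ≤ 2), hs]
        rfl
      rw [htake2, parse_two (gD m).1 hr10 d hd g1]
      rw [if_neg (by simp; exact_mod_cast hbig)]
      have htake1 : PySem.List.slice (Nat.toDigits 10 m) none (some 1) = [Nat.digitChar (gD m).1] := by
        rw [PySem.List.slice_to _ (by norm_num : (0:Int) ≤ 1), hs]
        rfl
      rw [htake1, parse_one (gD m).1 hr10 g1]
      rw [PySem.List.slice_from _ (by norm_num : (0:Int) ≤ 1), hs]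
      rw [ht]
      rfl
    · -- two-digit prefix ≤ 26, so p = 2
      have hlen2 : (Nat.toDigits 10 (gD m).1).length = 2 := by
        have := len_small (gD m).1 (by omega) g1
        rw [if_neg (by omega)] at this
        exact this
      have htake2 : PySem.List.slice (Nat.toDigits 10 m) none (some 2) = Nat.toDigits 10 (gD m).1 := by
        rw [PySem.List.slice_to _ (by norm_num : (0:Int) ≤ 2), g3,
          (by simp [hlen2] : Int.toNat 2 = (Nat.toDigits 10 (gD m).1).length)]
        exact List.take_left
      rw [htake2, parse_small (gD m).1 (by omega) g1]
      rw [if_pos (by simp; exact_mod_cast g2)]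
      rw [htake2, parse_small (gD m).1 (by omega) g1]
      rw [PySem.List.slice_from _ (by norm_num : (0:Int) ≤ 2), g3,
        (by simp [hlen2] : Int.toNat 2 = (Nat.toDigits 10 (gD m).1).length)]
      rw [List.drop_left]
      rfl

theorem key (integer : Option Int) :
    swiffy_integer_alt integer = swiffy_integer integer := by
  match integer with
  | none => rfl
  | some n =>
    by_cases hn : n = 0
    · subst hn
      rfl
    · show swiffy_integer_alt (some n) = String.ofList (swiffyCoreA (n.natAbs + 2) n)
      rw [swiffy_integer_alt]
      simp only [if_neg hn]
      have habs : PySem.Int.toChars (|n|) = Nat.toDigits 10 n.natAbs := by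
        rw [Int.abs_eq_natAbs, PySem.Int.toChars, if_neg (by omega)]
        simp only [Int.toNat_natCast]
      rw [habs]
      by_cases hpos : 0 < n
      · rw [if_pos hpos, a_side_pos (n.natAbs + 2) n hpos (by omega)]
        exact congrArg String.ofList (b_side n.natAbs (by omega) 96)
      · rw [if_neg hpos, a_side_neg (n.natAbs + 2) n (by omega) (by omega)]
        exact congrArg String.ofList (b_side n.natAbs (by omega) 64)

-- ===== VERDICT (by name: the statement is the Claim_ definition above) =====
theorem swiffy_integer_spec : Claim_equal_swiffy_integer := by
  intro integer _
  unfold Spec_swiffy_integer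
  exact (key integer).symm
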